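-- pv_equiv track=rewrite | github.com/engks4619/CodingTestPractice | 유형별 기출문제/구현_자물쇠와 열쇠.py | solution
-- ===== SOURCE A (Python) =====
-- def rotate_90(key):
--     n = len(key)
--     new_key = [[0]*n for _ in range(n)]
--     for y in range(n):
--         for x in range(n):
--             new_key[x][n-1-y] = key[y][x]
--     return new_key
--
-- def check(new_lock):
--     n = len(new_lock) // 3
--     for y in range(n, n*2):
--         for x in range(n, n*2):
--             if new_lock[y][x] != 1:
--                 return False
--     return True
--
-- def solution(key, lock):
--     n = len(lock)
--     m = len(key)
--     new_lock = [[0] * (n * 3) for _ in range(n * 3)]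
--     for y in range(n):
--         for x in range(n):
--             new_lock[y + n][x + n] = lock[y][x]
--     for _ in range(4):
--         key = rotate_90(key)
--         for y in range(n * 2):
--             for x in range(n * 2):
--                 for i in range(m):
--                     for j in range(m):
--                         new_lock[y + i][x + j] += key[i][j]
--                 if check(new_lock):
--                     return True
--                 for i in range(m):
--                     for j in range(m):
--                         new_lock[y+i][x+j] -= key[i][j]
--     return False
-- ===== SOURCE B (Python) =====
-- def solution(key, lock):
--     # Coordinate/arithmetic re-implementation: no padded 3n x 3n grid, no mutation.
--     # For each of the 4 rotations and each offset, the overlap value of every lock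
--     # cell is computed directly by index arithmetic and checked to equal 1.
--     n, m = len(lock), len(key)
--
--     def rot(k):
--         return [[k[m - 1 - j][i] for j in range(m)] for i in range(m)]
--
--     def fits(k, oy, ox):
--         return all(
--             lock[cy][cx]
--             + (k[cy + n - oy][cx + n - ox]
--                if oy <= cy + n < oy + m and ox <= cx + n < ox + m else 0)
--             == 1
--             for cy in range(n) for cx in range(n))
--
--     k = key
--     for _ in range(4):
--         k = rot(k)
--         if any(fits(k, oy, ox) for oy in range(2 * n) for ox in range(2 * n)):
--             return True
--     return False
-- ===== Notes on version B (the rewrite author's own statement) =====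
-- stated objective: simpler
-- what changed: B drops the padded 3n×3n working grid and its add/check/subtract mutation cycle: for each of the 4 key rotations and each offset it checks every lock cell directly (short-circuiting), computing the overlapping key contribution by index arithmetic, so the two unconditional m² add/subtract passes per offset disappear.
-- outside the precondition, e.g. on solution([[0, 0, 0], [0, 1, 0], [0, 0, 0]], [[0]]): A returns True, B returns True
import Mathlib
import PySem

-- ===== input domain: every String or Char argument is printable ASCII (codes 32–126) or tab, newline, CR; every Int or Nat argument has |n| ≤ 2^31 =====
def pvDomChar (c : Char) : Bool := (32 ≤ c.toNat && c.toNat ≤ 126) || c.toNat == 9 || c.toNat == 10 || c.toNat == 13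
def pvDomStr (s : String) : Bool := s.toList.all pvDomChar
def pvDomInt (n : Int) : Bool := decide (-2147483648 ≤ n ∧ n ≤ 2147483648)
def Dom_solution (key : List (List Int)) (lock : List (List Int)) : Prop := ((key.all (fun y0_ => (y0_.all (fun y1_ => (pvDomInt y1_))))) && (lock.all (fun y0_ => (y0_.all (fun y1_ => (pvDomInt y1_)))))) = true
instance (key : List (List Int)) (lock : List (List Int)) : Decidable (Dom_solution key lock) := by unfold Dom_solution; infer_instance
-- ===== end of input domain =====

-- B re-implements the lock-and-key check without the padded 3n×3n working grid:
-- each rotation/offset is judged by direct index arithmetic over the lock cells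
-- (objective: simpler — no mutation, no padding; same asymptotic cost).

-- ===== PORT A =====
-- grid cell read `g[y][x]` / write `g[y][x] = …`; inside Pre_ all indices used by A
-- are in range, so the getD/modify defaults are never observed.
def pvGet (g : List (List Int)) (y x : Nat) : Int := (g.getD y []).getD x 0
def pvUpd (g : List (List Int)) (y x : Nat) (f : Int → Int) : List (List Int) :=
  g.modify y (fun r => r.modify x f)

-- rotate_90
def rotate90 (key : List (List Int)) : List (List Int) :=
  let n := key.length
  (List.range n).foldl (fun nk y =>
      (List.range n).foldl (fun nk x => pvUpd nk x (n - 1 - y) (fun _ => pvGet key y x)) nk)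
    (List.replicate n (List.replicate n 0))

-- check
def checkA (nl : List (List Int)) : Bool :=
  let n := nl.length / 3
  (List.range' n n).all fun y => (List.range' n n).all fun x => pvGet nl y x == 1

-- the two inner double loops: add / subtract the key block at offset (y, x)
def addK (k nl : List (List Int)) (y x m : Nat) : List (List Int) :=
  (List.range m).foldl (fun nl i =>
    (List.range m).foldl (fun nl j => pvUpd nl (y + i) (x + j) (fun v => v + pvGet k i j)) nl) nl

def subK (k nl : List (List Int)) (y x m : Nat) : List (List Int) :=
  (List.range m).foldl (fun nl i =>
    (List.range m).foldl (fun nl j => pvUpd nl (y + i) (x + j) (fun v => v - pvGet k i j)) nl) nl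

-- the offset double loop of A (early return on success, grid threaded through)
def scanA (k : List (List Int)) (m : Nat) :
    List (Nat × Nat) → List (List Int) → Bool × List (List Int)
  | [], nl => (false, nl)
  | (y, x) :: rest, nl =>
      let nl1 := addK k nl y x m
      if checkA nl1 then (true, nl1) else scanA k m rest (subK k nl1 y x m)

-- `for _ in range(4)` rotation loop
def rotA (m : Nat) (offs : List (Nat × Nat)) : Nat → List (List Int) → List (List Int) → Bool
  | 0, _, _ => false
  | t + 1, k, nl =>
      let k1 := rotate90 k
      let r := scanA k1 m offs nl
      if r.1 then true else rotA m offs t k1 r.2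

def solution (key : List (List Int)) (lock : List (List Int)) : Bool :=
  let n := lock.length
  let m := key.length
  let nl0 :=
    (List.range n).foldl (fun nl y =>
        (List.range n).foldl (fun nl x => pvUpd nl (y + n) (x + n) (fun _ => pvGet lock y x)) nl)
      (List.replicate (n * 3) (List.replicate (n * 3) 0))
  let offs := (List.range (n * 2)).flatMap fun y => (List.range (n * 2)).map fun x => (y, x)
  rotA m offs 4 key nl0

-- ===== PORT B =====
-- direct indexing in Source B; in range under Pre_, so pvGet is exact here
def rotB (m : Nat) (k : List (List Int)) : List (List Int) :=
  (List.range m).map fun i => (List.range m).map fun j => pvGet k (m - 1 - j) i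

def fitsB (lock k : List (List Int)) (n m oy ox : Nat) : Bool :=
  (List.range n).all fun cy => (List.range n).all fun cx =>
    (pvGet lock cy cx +
        (if oy ≤ cy + n ∧ cy + n < oy + m ∧ ox ≤ cx + n ∧ cx + n < ox + m then
          pvGet k (cy + n - oy) (cx + n - ox) else 0)) == 1

def rotLoopB (lock : List (List Int)) (n m : Nat) : Nat → List (List Int) → Bool
  | 0, _ => false
  | t + 1, k =>
      let k1 := rotB m k
      if (List.range (2 * n)).any (fun oy => (List.range (2 * n)).any fun ox => fitsB lock k1 n m oy ox)
      then true
      else rotLoopB lock n m t k1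

def solution_alt (key : List (List Int)) (lock : List (List Int)) : Bool :=
  rotLoopB lock lock.length key.length 4 key

-- ===== PRECONDITION & SPEC =====
-- Pre_ excludes exactly the shapes on which A raises IndexError: a lock row shorter
-- than len(lock), a key row shorter than len(key), or a key with m > n+1 (whose
-- offset loop indexes outside the padded 3n×3n grid unless an early success returns
-- first; that early-True sliver is excluded with it — see claim cites).
def Pre_solution (key : List (List Int)) (lock : List (List Int)) : Prop :=
  key.length ≤ lock.length + 1 ∧
  (∀ r ∈ lock, lock.length ≤ r.length) ∧
  (∀ r ∈ key, key.length ≤ r.length)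
instance (key : List (List Int)) (lock : List (List Int)) : Decidable (Pre_solution key lock) := by
  unfold Pre_solution; infer_instance

def pvWitness_solution : List (List Int) × List (List Int) := ([[1]], [[0, 1], [1, 1]])

def Spec_solution (key : List (List Int)) (lock : List (List Int)) (out : Bool) : Prop := out = solution_alt key lock
instance (key : List (List Int)) (lock : List (List Int)) (out : Bool) : Decidable (Spec_solution key lock out) := by unfold Spec_solution; infer_instance

-- ===== CLAIM (what is proved, stated in full; the proofs are below) =====
def Claim_equal_solution : Prop := ∀ (key : List (List Int)) (lock : List (List Int)), Dom_solution key lock → Pre_solution key lock → Spec_solution key lock (solution key lock)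

-- ===== LEMMAS AND PROOFS =====

-- square shape invariant of the working grids
def Sq (L : Nat) (g : List (List Int)) : Prop := g.length = L ∧ ∀ r ∈ g, r.length = L

-- value of the freshly padded grid
def baseVal (lock : List (List Int)) (n cy cx : Nat) : Int :=
  if n ≤ cy ∧ cy < 2 * n ∧ n ≤ cx ∧ cx < 2 * n then pvGet lock (cy - n) (cx - n) else 0

theorem Sq_upd {L : Nat} {g : List (List Int)} (h : Sq L g) (y x : Nat) (f : Int → Int) :
    Sq L (pvUpd g y x f) := by
  obtain ⟨hlen, hrow⟩ := h
  refine ⟨by simp [pvUpd, hlen], ?_⟩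
  intro r hr
  rw [List.mem_iff_getElem?] at hr
  obtain ⟨i, hi⟩ := hr
  rw [pvUpd, List.getElem?_modify] at hi
  cases hg : g[i]? with
  | none => simp [hg] at hi
  | some r' =>
    have hr' : r' ∈ g := List.mem_of_getElem? hg
    simp only [hg, Option.map_some] at hi
    by_cases hyi : y = i
    · simp [hyi] at hi
      simp [← hi, hrow r' hr']
    · simp [hyi] at hi
      simp [← hi, hrow r' hr']

theorem pvGet_upd {L : Nat} {g : List (List Int)} (h : Sq L g) {y x : Nat}
    (hy : y < L) (hx : x < L) (f : Int → Int) (cy cx : Nat) :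
    pvGet (pvUpd g y x f) cy cx =
      if cy = y ∧ cx = x then f (pvGet g y x) else pvGet g cy cx := by
  obtain ⟨hlen, hrow⟩ := h
  have hglt : y < g.length := by omega
  have hg : g[y]? = some (g[y]'hglt) := List.getElem?_eq_getElem hglt
  have hrl : (g[y]'hglt).length = L := hrow _ (List.getElem_mem hglt)
  simp only [pvGet, pvUpd, List.getD_eq_getElem?_getD, List.getElem?_modify]
  by_cases hcy : cy = y
  · rw [hcy, hg]
    simp only [Option.map_some, if_pos rfl, Option.getD_some, List.getD_eq_getElem?_getD,
      List.getElem?_modify, if_true, true_and]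
    by_cases hcx : cx = x
    · subst hcx
      have hxl : cx < (g[y]'hglt).length := by omega
      simp [List.getElem?_modify, List.getElem?_eq_getElem hxl]
    · have hxc : ¬ x = cx := fun hh => hcx hh.symm
      rw [if_neg hcx]
      cases hrc : (g[y]'hglt)[cx]? with
      | none => simp [List.getElem?_modify, hrc, hxc]
      | some v => simp [List.getElem?_modify, hrc, hxc]
  · have hyc : ¬ y = cy := fun hh => hcy hh.symm
    rw [if_neg (by tauto : ¬ (cy = y ∧ cx = x))]
    cases hgc : g[cy]? with
    | none => simp [hgc]
    | some r => simp [hgc, hyc]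

theorem Sq_foldUpd {τ : Type} {L : Nat} (ts : List τ) (A B : τ → Nat) (F : τ → Int → Int)
    {g : List (List Int)} (h : Sq L g) :
    Sq L (ts.foldl (fun g t => pvUpd g (A t) (B t) (F t)) g) := by
  induction ts generalizing g with
  | nil => exact h
  | cons t rest ih => exact ih (Sq_upd h _ _ _)

theorem get_foldUpd {τ : Type} [DecidableEq τ] {L : Nat} (ts : List τ)
    (A B : τ → Nat) (F : τ → Int → Int) {g : List (List Int)} (h : Sq L g)
    (hAB : ∀ t ∈ ts, A t < L ∧ B t < L) (hnd : ts.Nodup)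
    (hinj : ∀ t ∈ ts, ∀ t' ∈ ts, A t = A t' → B t = B t' → t = t') (cy cx : Nat) :
    pvGet (ts.foldl (fun g t => pvUpd g (A t) (B t) (F t)) g) cy cx =
      match ts.find? (fun t => A t == cy && B t == cx) with
      | some t => F t (pvGet g cy cx)
      | none => pvGet g cy cx := by
  induction ts generalizing g with
  | nil => rfl
  | cons t0 rest ih =>
    simp only [List.foldl_cons, List.find?_cons]
    obtain ⟨hA0, hB0⟩ := hAB t0 (by simp)
    have hSq1 := Sq_upd h (A t0) (B t0) (F t0)
    have hnd' := hnd.of_cons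
    have hAB' : ∀ t ∈ rest, A t < L ∧ B t < L := fun t ht => hAB t (by simp [ht])
    have hinj' : ∀ t ∈ rest, ∀ t' ∈ rest, A t = A t' → B t = B t' → t = t' :=
      fun t ht t' ht' => hinj t (by simp [ht]) t' (by simp [ht'])
    rw [ih hSq1 hAB' hnd' hinj']
    by_cases hhit : A t0 = cy ∧ B t0 = cx
    · have hp : (A t0 == cy && B t0 == cx) = true := by
        simp [hhit.1, hhit.2]
      rw [hp]
      have hnone : rest.find? (fun t => A t == cy && B t == cx) = none := by
        rw [List.find?_eq_none]
        intro t ht hpt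
        simp only [Bool.and_eq_true, beq_iff_eq] at hpt
        have : t = t0 := hinj t (by simp [ht]) t0 (by simp)
          (by rw [hpt.1, hhit.1]) (by rw [hpt.2, hhit.2])
        subst this
        exact (List.nodup_cons.mp hnd).1 ht
      rw [hnone]
      rw [pvGet_upd h hA0 hB0, if_pos ⟨hhit.1.symm, hhit.2.symm⟩]
      simp [hhit.1, hhit.2]
    · have hp : (A t0 == cy && B t0 == cx) = false := by
        rcases Decidable.not_and_iff_not_or_not.mp hhit with h1 | h1 <;> simp [h1]
      rw [hp]
      have hgu : pvGet (pvUpd g (A t0) (B t0) (F t0)) cy cx = pvGet g cy cx := by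
        rw [pvGet_upd h hA0 hB0, if_neg (by tauto)]
      cases hf : rest.find? (fun t => A t == cy && B t == cx) with
      | none => simp [hgu]
      | some t => simp [hgu]

theorem get_foldUpd_hit {τ : Type} [DecidableEq τ] {L : Nat} (ts : List τ)
    (A B : τ → Nat) (F : τ → Int → Int) {g : List (List Int)} (h : Sq L g)
    (hAB : ∀ t ∈ ts, A t < L ∧ B t < L) (hnd : ts.Nodup)
    (hinj : ∀ t ∈ ts, ∀ t' ∈ ts, A t = A t' → B t = B t' → t = t')
    {cy cx : Nat} {t0 : τ} (ht0 : t0 ∈ ts) (hA0 : A t0 = cy) (hB0 : B t0 = cx) :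
    pvGet (ts.foldl (fun g t => pvUpd g (A t) (B t) (F t)) g) cy cx = F t0 (pvGet g cy cx) := by
  rw [get_foldUpd ts A B F h hAB hnd hinj cy cx]
  cases hf : ts.find? (fun t => A t == cy && B t == cx) with
  | none =>
    rw [List.find?_eq_none] at hf
    exact absurd (by simp [hA0, hB0]) (hf t0 ht0)
  | some t =>
    have hmem := List.mem_of_find?_eq_some hf
    have hpt := List.find?_some hf
    simp only [Bool.and_eq_true, beq_iff_eq] at hpt
    have : t = t0 := hinj t hmem t0 ht0 (by rw [hpt.1, hA0]) (by rw [hpt.2, hB0])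
    rw [this]

theorem get_foldUpd_miss {τ : Type} [DecidableEq τ] {L : Nat} (ts : List τ)
    (A B : τ → Nat) (F : τ → Int → Int) {g : List (List Int)} (h : Sq L g)
    (hAB : ∀ t ∈ ts, A t < L ∧ B t < L) (hnd : ts.Nodup)
    (hinj : ∀ t ∈ ts, ∀ t' ∈ ts, A t = A t' → B t = B t' → t = t')
    {cy cx : Nat} (hno : ∀ t ∈ ts, ¬(A t = cy ∧ B t = cx)) :
    pvGet (ts.foldl (fun g t => pvUpd g (A t) (B t) (F t)) g) cy cx = pvGet g cy cx := by
  rw [get_foldUpd ts A B F h hAB hnd hinj cy cx]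
  have hf : ts.find? (fun t => A t == cy && B t == cx) = none := by
    rw [List.find?_eq_none]
    intro t ht hpt
    simp only [Bool.and_eq_true, beq_iff_eq] at hpt
    exact hno t ht hpt
  rw [hf]

theorem foldl_nest {α β : Type} (outer : List α) (inner : List β)
    (step : List (List Int) → α → β → List (List Int)) (g : List (List Int)) :
    outer.foldl (fun g a => inner.foldl (fun g b => step g a b) g) g =
      (outer.flatMap fun a => inner.map fun b => (a, b)).foldl (fun g t => step g t.1 t.2) g := by
  induction outer generalizing g with
  | nil => rfl
  | cons a rest ih =>
    simp only [List.foldl_cons, List.flatMap_cons, List.foldl_append, List.foldl_map]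
    exact ih _

theorem nodup_prodList (a b : Nat) :
    ((List.range a).flatMap fun y => (List.range b).map fun x => (y, x)).Nodup := by
  have : ((List.range a).flatMap fun y => (List.range b).map fun x => (y, x)) =
      List.range a ×ˢ List.range b := rfl
  rw [this]
  exact List.Nodup.product (List.nodup_range) (List.nodup_range)

theorem mem_prodList {a b y x : Nat} :
    (y, x) ∈ ((List.range a).flatMap fun y => (List.range b).map fun x => (y, x)) ↔
      y < a ∧ x < b := by
  have : ((List.range a).flatMap fun y => (List.range b).map fun x => (y, x)) =
      List.range a ×ˢ List.range b := rfl
  rw [this]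
  simp [List.mem_product]

theorem Sq_repl (n : Nat) : Sq n (List.replicate n (List.replicate n (0 : Int))) := by
  refine ⟨by simp, ?_⟩
  intro r hr
  rw [List.eq_of_mem_replicate hr]
  simp

theorem get_repl (a cy cx : Nat) :
    pvGet (List.replicate a (List.replicate a (0 : Int))) cy cx = 0 := by
  unfold pvGet
  simp only [List.getD_eq_getElem?_getD, List.getElem?_replicate]
  split_ifs <;> simp [List.getElem?_replicate] <;> split_ifs <;> simp

theorem base_char (lock : List (List Int)) (cy cx : Nat) :
    pvGet ((List.range lock.length).foldl (fun nl y =>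
        (List.range lock.length).foldl
          (fun nl x => pvUpd nl (y + lock.length) (x + lock.length) (fun _ => pvGet lock y x)) nl)
      (List.replicate (lock.length * 3) (List.replicate (lock.length * 3) 0))) cy cx =
      baseVal lock lock.length cy cx := by
  set n := lock.length with hn
  rw [foldl_nest (step := fun g a b => pvUpd g (a + n) (b + n) (fun _ => pvGet lock a b))]
  have hSq := Sq_repl (n * 3)
  have hAB : ∀ t ∈ ((List.range n).flatMap fun y => (List.range n).map fun x => (y, x)),
      t.1 + n < n * 3 ∧ t.2 + n < n * 3 := by
    rintro ⟨ty, tx⟩ ht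
    rw [mem_prodList] at ht
    constructor <;> [skip; skip] <;> simp only <;> omega
  have hinj : ∀ t ∈ ((List.range n).flatMap fun y => (List.range n).map fun x => (y, x)),
      ∀ t' ∈ ((List.range n).flatMap fun y => (List.range n).map fun x => (y, x)),
      t.1 + n = t'.1 + n → t.2 + n = t'.2 + n → t = t' := by
    rintro ⟨a1, a2⟩ _ ⟨b1, b2⟩ _ h1 h2
    simp only at h1 h2
    simp only [Prod.mk.injEq]
    omega
  by_cases hin : n ≤ cy ∧ cy < 2 * n ∧ n ≤ cx ∧ cx < 2 * n
  · rw [get_foldUpd_hit (t0 := (cy - n, cx - n))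
        ((List.range n).flatMap fun y => (List.range n).map fun x => (y, x))
        (fun t => t.1 + n) (fun t => t.2 + n) (fun t _ => pvGet lock t.1 t.2)
        hSq hAB (nodup_prodList n n) hinj (mem_prodList.mpr (by omega))
        (by simp only; omega) (by simp only; omega)]
    rw [baseVal, if_pos hin]
  · rw [get_foldUpd_miss
        ((List.range n).flatMap fun y => (List.range n).map fun x => (y, x))
        (fun t => t.1 + n) (fun t => t.2 + n) (fun t _ => pvGet lock t.1 t.2)
        hSq hAB (nodup_prodList n n) hinj
        (by rintro ⟨a1, a2⟩ ht ⟨h1, h2⟩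
            rw [mem_prodList] at ht
            simp only at h1 h2
            omega)]
    rw [get_repl, baseVal, if_neg hin]

theorem Sq_base (lock : List (List Int)) :
    Sq (lock.length * 3) ((List.range lock.length).foldl (fun nl y =>
        (List.range lock.length).foldl
          (fun nl x => pvUpd nl (y + lock.length) (x + lock.length) (fun _ => pvGet lock y x)) nl)
      (List.replicate (lock.length * 3) (List.replicate (lock.length * 3) 0))) := by
  rw [foldl_nest (step := fun g a b =>
    pvUpd g (a + lock.length) (b + lock.length) (fun _ => pvGet lock a b))]
  exact Sq_foldUpd _ _ _ _ (Sq_repl _)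

theorem Sq_rotate90 {m : Nat} {k : List (List Int)} (hk : k.length = m) : Sq m (rotate90 k) := by
  rw [rotate90, hk]
  rw [foldl_nest (step := fun g a b => pvUpd g b (m - 1 - a) (fun _ => pvGet k a b))]
  exact Sq_foldUpd _ _ _ _ (Sq_repl _)

theorem get_rotate90 {m : Nat} {k : List (List Int)} (hk : k.length = m) {i j : Nat}
    (hi : i < m) (hj : j < m) : pvGet (rotate90 k) i j = pvGet k (m - 1 - j) i := by
  rw [rotate90, hk]
  rw [foldl_nest (step := fun g a b => pvUpd g b (m - 1 - a) (fun _ => pvGet k a b))]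
  rw [get_foldUpd_hit (t0 := (m - 1 - j, i))
      ((List.range m).flatMap fun y => (List.range m).map fun x => (y, x))
      (fun t => t.2) (fun t => m - 1 - t.1) (fun t _ => pvGet k t.1 t.2)
      (Sq_repl m)
      (by rintro ⟨a1, a2⟩ ht
          rw [mem_prodList] at ht
          constructor <;> simp only <;> omega)
      (nodup_prodList m m)
      (by rintro ⟨a1, a2⟩ ha ⟨b1, b2⟩ hb h1 h2
          rw [mem_prodList] at ha hb
          simp only at h1 h2
          simp only [Prod.mk.injEq]
          omega)
      (mem_prodList.mpr (by omega)) (by simp only) (by simp only; omega)]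

theorem len_rotB (m : Nat) (k : List (List Int)) : (rotB m k).length = m := by
  simp [rotB]

theorem get_rotB {m : Nat} (k : List (List Int)) {i j : Nat} (hi : i < m) (hj : j < m) :
    pvGet (rotB m k) i j = pvGet k (m - 1 - j) i := by
  unfold rotB pvGet
  simp only [List.getD_eq_getElem?_getD]
  rw [List.getElem?_map, List.getElem?_range hi]
  simp only [Option.map_some, Option.getD_some]
  rw [List.getElem?_map, List.getElem?_range hj]
  simp only [Option.map_some, Option.getD_some]

theorem Sq_addK {n m : Nat} {k nl : List (List Int)} (h : Sq (n * 3) nl) (y x : Nat) :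
    Sq (n * 3) (addK k nl y x m) := by
  rw [addK]
  rw [foldl_nest (step := fun g a b => pvUpd g (y + a) (x + b) (fun v => v + pvGet k a b))]
  exact Sq_foldUpd _ _ _ _ h

theorem Sq_subK {n m : Nat} {k nl : List (List Int)} (h : Sq (n * 3) nl) (y x : Nat) :
    Sq (n * 3) (subK k nl y x m) := by
  rw [subK]
  rw [foldl_nest (step := fun g a b => pvUpd g (y + a) (x + b) (fun v => v - pvGet k a b))]
  exact Sq_foldUpd _ _ _ _ h

theorem get_addK {n m : Nat} {k nl : List (List Int)} (h : Sq (n * 3) nl)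
    {y x : Nat} (hy : y < n * 2) (hx : x < n * 2) (hm : m ≤ n + 1) (cy cx : Nat) :
    pvGet (addK k nl y x m) cy cx =
      pvGet nl cy cx +
        (if y ≤ cy ∧ cy < y + m ∧ x ≤ cx ∧ cx < x + m then pvGet k (cy - y) (cx - x) else 0) := by
  rw [addK]
  rw [foldl_nest (step := fun g a b => pvUpd g (y + a) (x + b) (fun v => v + pvGet k a b))]
  have hAB : ∀ t ∈ ((List.range m).flatMap fun y => (List.range m).map fun x => (y, x)),
      y + t.1 < n * 3 ∧ x + t.2 < n * 3 := by
    rintro ⟨a1, a2⟩ ht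
    rw [mem_prodList] at ht
    constructor <;> simp only <;> omega
  have hinj : ∀ t ∈ ((List.range m).flatMap fun y => (List.range m).map fun x => (y, x)),
      ∀ t' ∈ ((List.range m).flatMap fun y => (List.range m).map fun x => (y, x)),
      y + t.1 = y + t'.1 → x + t.2 = x + t'.2 → t = t' := by
    rintro ⟨a1, a2⟩ _ ⟨b1, b2⟩ _ h1 h2
    simp only at h1 h2
    simp only [Prod.mk.injEq]
    omega
  by_cases hin : y ≤ cy ∧ cy < y + m ∧ x ≤ cx ∧ cx < x + m
  · rw [get_foldUpd_hit (t0 := (cy - y, cx - x))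
        ((List.range m).flatMap fun y => (List.range m).map fun x => (y, x))
        (fun t => y + t.1) (fun t => x + t.2) (fun t v => v + pvGet k t.1 t.2)
        h hAB (nodup_prodList m m) hinj (mem_prodList.mpr (by omega))
        (by simp only; omega) (by simp only; omega)]
    rw [if_pos hin]
  · rw [get_foldUpd_miss
        ((List.range m).flatMap fun y => (List.range m).map fun x => (y, x))
        (fun t => y + t.1) (fun t => x + t.2) (fun t v => v + pvGet k t.1 t.2)
        h hAB (nodup_prodList m m) hinj
        (by rintro ⟨a1, a2⟩ ht ⟨h1, h2⟩
            rw [mem_prodList] at ht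
            simp only at h1 h2
            omega)]
    rw [if_neg hin, add_zero]

theorem get_subK {n m : Nat} {k nl : List (List Int)} (h : Sq (n * 3) nl)
    {y x : Nat} (hy : y < n * 2) (hx : x < n * 2) (hm : m ≤ n + 1) (cy cx : Nat) :
    pvGet (subK k nl y x m) cy cx =
      pvGet nl cy cx -
        (if y ≤ cy ∧ cy < y + m ∧ x ≤ cx ∧ cx < x + m then pvGet k (cy - y) (cx - x) else 0) := by
  rw [subK]
  rw [foldl_nest (step := fun g a b => pvUpd g (y + a) (x + b) (fun v => v - pvGet k a b))]
  have hAB : ∀ t ∈ ((List.range m).flatMap fun y => (List.range m).map fun x => (y, x)),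
      y + t.1 < n * 3 ∧ x + t.2 < n * 3 := by
    rintro ⟨a1, a2⟩ ht
    rw [mem_prodList] at ht
    constructor <;> simp only <;> omega
  have hinj : ∀ t ∈ ((List.range m).flatMap fun y => (List.range m).map fun x => (y, x)),
      ∀ t' ∈ ((List.range m).flatMap fun y => (List.range m).map fun x => (y, x)),
      y + t.1 = y + t'.1 → x + t.2 = x + t'.2 → t = t' := by
    rintro ⟨a1, a2⟩ _ ⟨b1, b2⟩ _ h1 h2
    simp only at h1 h2
    simp only [Prod.mk.injEq]
    omega
  by_cases hin : y ≤ cy ∧ cy < y + m ∧ x ≤ cx ∧ cx < x + m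
  · rw [get_foldUpd_hit (t0 := (cy - y, cx - x))
        ((List.range m).flatMap fun y => (List.range m).map fun x => (y, x))
        (fun t => y + t.1) (fun t => x + t.2) (fun t v => v - pvGet k t.1 t.2)
        h hAB (nodup_prodList m m) hinj (mem_prodList.mpr (by omega))
        (by simp only; omega) (by simp only; omega)]
    rw [if_pos hin]
  · rw [get_foldUpd_miss
        ((List.range m).flatMap fun y => (List.range m).map fun x => (y, x))
        (fun t => y + t.1) (fun t => x + t.2) (fun t v => v - pvGet k t.1 t.2)
        h hAB (nodup_prodList m m) hinj
        (by rintro ⟨a1, a2⟩ ht ⟨h1, h2⟩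
            rw [mem_prodList] at ht
            simp only at h1 h2
            omega)]
    rw [if_neg hin, sub_zero]

theorem all_range_congr {n : Nat} {f g : Nat → Bool} (h : ∀ i, i < n → f i = g i) :
    (List.range n).all f = (List.range n).all g := by
  induction n with
  | zero => rfl
  | succ n ih =>
    rw [List.range_succ]
    simp only [List.all_append, List.all_cons, List.all_nil]
    rw [ih (fun i hi => h i (by omega)), h n (by omega)]

theorem any_range_congr {n : Nat} {f g : Nat → Bool} (h : ∀ i, i < n → f i = g i) :
    (List.range n).any f = (List.range n).any g := by
  induction n with
  | zero => rfl
  | succ n ih =>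
    rw [List.range_succ]
    simp only [List.any_append, List.any_cons, List.any_nil]
    rw [ih (fun i hi => h i (by omega)), h n (by omega)]

theorem check_eq_fits {lock k nl : List (List Int)} {m : Nat}
    (hS : Sq (lock.length * 3) nl)
    (hinv : ∀ cy cx, pvGet nl cy cx = baseVal lock lock.length cy cx)
    {y x : Nat} (hy : y < lock.length * 2) (hx : x < lock.length * 2) (hm : m ≤ lock.length + 1) :
    checkA (addK k nl y x m) = fitsB lock k lock.length m y x := by
  set n := lock.length with hn
  have hS1 : Sq (n * 3) (addK k nl y x m) := Sq_addK hS y x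
  have hcell : ∀ cy cx, cy < n → cx < n →
      pvGet (addK k nl y x m) (n + cy) (n + cx) =
        pvGet lock cy cx +
          (if y ≤ cy + n ∧ cy + n < y + m ∧ x ≤ cx + n ∧ cx + n < x + m then
            pvGet k (cy + n - y) (cx + n - x) else 0) := by
    intro cy cx hcy hcx
    rw [show n + cy = cy + n by omega, show n + cx = cx + n by omega]
    rw [get_addK hS hy hx hm, hinv, baseVal, if_pos (by omega),
      show cy + n - n = cy by omega, show cx + n - n = cx by omega]
  unfold checkA fitsB
  simp only [hS1.1, show n * 3 / 3 = n by omega]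
  simp only [List.range'_eq_map_range, List.all_map, Function.comp]
  refine all_range_congr (fun cy hcy => all_range_congr (fun cx hcx => ?_))
  simp only [Function.comp_apply]
  rw [hcell cy cx hcy hcx]

theorem scan_lemma {lock k : List (List Int)} {m : Nat} (hm : m ≤ lock.length + 1)
    (offs : List (Nat × Nat))
    (hoffs : ∀ p ∈ offs, p.1 < lock.length * 2 ∧ p.2 < lock.length * 2) :
    ∀ nl, Sq (lock.length * 3) nl →
      (∀ cy cx, pvGet nl cy cx = baseVal lock lock.length cy cx) →
      (scanA k m offs nl).1 = offs.any (fun p => fitsB lock k lock.length m p.1 p.2) ∧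
      ((scanA k m offs nl).1 = false →
        Sq (lock.length * 3) (scanA k m offs nl).2 ∧
        ∀ cy cx, pvGet (scanA k m offs nl).2 cy cx = baseVal lock lock.length cy cx) := by
  induction offs with
  | nil =>
    intro nl hS hinv
    exact ⟨rfl, fun _ => ⟨hS, hinv⟩⟩
  | cons p rest ih =>
    intro nl hS hinv
    obtain ⟨y, x⟩ := p
    obtain ⟨hy, hx⟩ := hoffs (y, x) (by simp)
    have hoffs' : ∀ p ∈ rest, p.1 < lock.length * 2 ∧ p.2 < lock.length * 2 :=
      fun p hp => hoffs p (by simp [hp])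
    have hchk : checkA (addK k nl y x m) = fitsB lock k lock.length m y x :=
      check_eq_fits hS hinv hy hx hm
    have hSadd : Sq (lock.length * 3) (addK k nl y x m) := Sq_addK hS y x
    have hSsub : Sq (lock.length * 3) (subK k (addK k nl y x m) y x m) := Sq_subK hSadd y x
    have hinv2 : ∀ cy cx,
        pvGet (subK k (addK k nl y x m) y x m) cy cx = baseVal lock lock.length cy cx := by
      intro cy cx
      rw [get_subK hSadd hy hx hm, get_addK hS hy hx hm, add_sub_cancel_right, hinv]
    cases hc : checkA (addK k nl y x m) with
    | true =>
      have hsc : scanA k m ((y, x) :: rest) nl = (true, addK k nl y x m) := by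
        simp [scanA, hc]
      rw [hsc, List.any_cons, ← hchk, hc]
      exact ⟨rfl, by simp⟩
    | false =>
      have hsc : scanA k m ((y, x) :: rest) nl = scanA k m rest (subK k (addK k nl y x m) y x m) := by
        simp [scanA, hc]
      rw [hsc, List.any_cons, ← hchk, hc, Bool.false_or]
      exact ih hoffs' _ hSsub hinv2

theorem fits_congr {lock k1 k2 : List (List Int)} {n m oy ox : Nat}
    (h : ∀ i j, i < m → j < m → pvGet k1 i j = pvGet k2 i j) :
    fitsB lock k1 n m oy ox = fitsB lock k2 n m oy ox := by
  unfold fitsB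
  refine all_range_congr (fun cy hcy => all_range_congr (fun cx hcx => ?_))
  by_cases hc : oy ≤ cy + n ∧ cy + n < oy + m ∧ ox ≤ cx + n ∧ cx + n < ox + m
  · rw [if_pos hc, if_pos hc, h _ _ (by omega) (by omega)]
  · rw [if_neg hc, if_neg hc]

theorem rot_lemma {lock : List (List Int)} {m : Nat} (hm : m ≤ lock.length + 1) :
    ∀ (t : Nat) (kA kB nl : List (List Int)), kA.length = m → kB.length = m →
      (∀ i j, i < m → j < m → pvGet kA i j = pvGet kB i j) →
      Sq (lock.length * 3) nl →
      (∀ cy cx, pvGet nl cy cx = baseVal lock lock.length cy cx) →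
      rotA m ((List.range (lock.length * 2)).flatMap fun y =>
          (List.range (lock.length * 2)).map fun x => (y, x)) t kA nl =
        rotLoopB lock lock.length m t kB := by
  intro t
  induction t with
  | zero => intro kA kB nl _ _ _ _ _; rfl
  | succ t ih =>
    intro kA kB nl hkA hkB hpt hS hinv
    have hSrot : Sq m (rotate90 kA) := Sq_rotate90 hkA
    have hpt1 : ∀ i j, i < m → j < m → pvGet (rotate90 kA) i j = pvGet (rotB m kB) i j := by
      intro i j hi hj
      rw [get_rotate90 hkA hi hj, get_rotB kB hi hj, hpt _ _ (by omega) hi]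
    have hoffs : ∀ p ∈ ((List.range (lock.length * 2)).flatMap fun y =>
        (List.range (lock.length * 2)).map fun x => (y, x)),
        p.1 < lock.length * 2 ∧ p.2 < lock.length * 2 := by
      rintro ⟨a1, a2⟩ hp
      rw [mem_prodList] at hp
      exact hp
    obtain ⟨hscan, hrest⟩ :=
      scan_lemma (k := rotate90 kA) hm _ hoffs nl hS hinv
    have hany : ((List.range (lock.length * 2)).flatMap fun y =>
          (List.range (lock.length * 2)).map fun x => (y, x)).any
            (fun p => fitsB lock (rotate90 kA) lock.length m p.1 p.2) =
        (List.range (2 * lock.length)).any fun oy =>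
          (List.range (2 * lock.length)).any fun ox =>
            fitsB lock (rotB m kB) lock.length m oy ox := by
      rw [show 2 * lock.length = lock.length * 2 by ring, List.any_flatMap]
      refine any_range_congr (fun oy hoy => ?_)
      rw [List.any_map]
      refine any_range_congr (fun ox hox => ?_)
      simp only [Function.comp_apply]
      exact fits_congr hpt1
    have hlen1 : (rotate90 kA).length = m := hSrot.1
    have hlen2 : (rotB m kB).length = m := len_rotB m kB
    simp only [rotA, rotLoopB]
    rw [hscan, hany]
    cases hfound : (List.range (2 * lock.length)).any fun oy =>
        (List.range (2 * lock.length)).any fun ox =>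
          fitsB lock (rotB m kB) lock.length m oy ox with
    | true => simp
    | false =>
      rw [if_neg (by simp : ¬ (false = true)), if_neg (by simp : ¬ (false = true))]
      have hr := hrest (by rw [hscan, hany, hfound])
      exact ih (rotate90 kA) (rotB m kB) _ hlen1 hlen2 hpt1 hr.1 hr.2

-- ===== VERDICT (by name: the statement is the Claim_ definition above) =====
theorem solution_spec : Claim_equal_solution := by
  intro key lock _ hpre
  obtain ⟨hm, _, _⟩ := hpre
  show solution key lock = solution_alt key lock
  unfold solution solution_alt
  exact rot_lemma hm 4 key key _ rfl rfl (fun _ _ _ _ => rfl) (Sq_base lock) (base_char lock)
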